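-- pv_equiv track=rewrite | github.com/VivianePons/public-notebooks | sWeakOrder/spermutahedron_old.py | ascents
-- ===== SOURCE A (Python) =====
-- def getZeros(s):
--     if s is None:
--         return set()
--     else:
--         return {i+1 for i in range(len(s)) if s[i]==0}
--
-- def ascents(sperm, s = None):
--     zeros = getZeros(s)
--     for i in range(len(sperm)-1):
--         if sperm[i] in zeros:
--             for j in range(i+1,len(sperm)):
--                 if sperm[j] > sperm[i]:
--                     yield (i,j)
--                     break
--         elif sperm[i] < sperm[i+1]:
--             yield i,i+1
-- ===== SOURCE B (Python) =====
-- def ascents(sperm, s=None):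
--     # Monotonic stack computes every next-greater index once, then one pass emits the pairs.
--     zeros = set() if s is None else {i+1 for i in range(len(s)) if s[i] == 0}
--     n = len(sperm)
--     nge = [None] * n          # nge[i] = first j > i with sperm[j] > sperm[i]
--     stack = []
--     for j in range(n):
--         while stack and sperm[stack[-1]] < sperm[j]:
--             nge[stack.pop()] = j
--         stack.append(j)
--     for i in range(n - 1):
--         if sperm[i] in zeros:
--             if nge[i] is not None:
--                 yield (i, nge[i])
--         elif sperm[i] < sperm[i + 1]:
--             yield (i, i + 1)
-- ===== Notes on version B (the rewrite author's own statement) =====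
-- stated objective: alternative
-- what changed: Replaces A's per-index inner scan for the first later greater element by a single monotonic-stack pass that computes all next-greater indices once, then one linear pass emits the pairs.
import Mathlib
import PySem

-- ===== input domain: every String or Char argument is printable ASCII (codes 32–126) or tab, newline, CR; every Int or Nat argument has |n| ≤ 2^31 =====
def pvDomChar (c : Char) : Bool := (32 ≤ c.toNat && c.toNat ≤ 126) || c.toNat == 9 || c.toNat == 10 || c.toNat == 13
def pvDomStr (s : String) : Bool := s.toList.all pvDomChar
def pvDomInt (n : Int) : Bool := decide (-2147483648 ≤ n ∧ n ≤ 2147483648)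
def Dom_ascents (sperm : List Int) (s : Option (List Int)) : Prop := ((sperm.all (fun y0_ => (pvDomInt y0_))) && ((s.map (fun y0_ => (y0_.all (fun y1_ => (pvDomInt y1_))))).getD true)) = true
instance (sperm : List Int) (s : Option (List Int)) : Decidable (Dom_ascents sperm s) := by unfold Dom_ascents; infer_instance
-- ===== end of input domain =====

-- B replaces A's per-index inner scan (first later greater element, recomputed per index) by a
-- single monotonic-stack pass computing all next-greater indices once; the return value is
-- proved identical on every input (both functions are total).

-- ===== PORT A =====
-- Python helper getZeros(s): {i+1 for i in range(len(s)) if s[i]==0}  (used verbatim by both Pythons)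
def getZeros (s : Option (List Int)) : PySem.Set Int :=
  match s with
  | none => PySem.Set.empty
  | some l => PySem.Set.ofList
      (((PySem.List.pyRange 0 l.length 1).filter
          (fun i => PySem.List.pyGetD l i 0 == 0)).map (fun i => i + 1))

-- inner loop of A: 'for j in range(i+1, len(sperm)): if sperm[j] > sperm[i]: … break'
-- (indices produced by the loops are always in range, so getD is exact here)
def firstAsc (sperm : List Int) (vi : Int) (n j : Nat) : Option Nat :=
  if h : j < n then
    if vi < sperm.getD j 0 then some j else firstAsc sperm vi n (j + 1)
  else none
termination_by n - j

def ascents (sperm : List Int) (s : Option (List Int)) : List (Int × Int) :=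
  let zeros := getZeros s
  (List.range (sperm.length - 1)).foldl
    (fun acc i =>
      if PySem.Set.contains zeros (sperm.getD i 0) then
        match firstAsc sperm (sperm.getD i 0) sperm.length (i + 1) with
        | some j => acc ++ [((i : Int), (j : Int))]
        | none => acc
      else if sperm.getD i 0 < sperm.getD (i + 1) 0 then
        acc ++ [((i : Int), (i : Int) + 1)]
      else acc)
    []

-- ===== PORT B =====
-- 'while stack and sperm[stack[-1]] < sperm[j]: nge[stack.pop()] = j'
def popLoop (sperm : List Int) (j : Nat) :
    List Nat → List (Option Int) → List Nat × List (Option Int)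
  | [], nge => ([], nge)
  | k :: st, nge =>
      if sperm.getD k 0 < sperm.getD j 0 then
        popLoop sperm j st (nge.set k (some (j : Int)))
      else (k :: st, nge)

-- first pass of B: nge = [None]*n; for j in range(n): pop smaller tops, record j, push j
def buildNge (sperm : List Int) : List (Option Int) :=
  ((List.range sperm.length).foldl
      (fun p j =>
        let q := popLoop sperm j p.1 p.2
        (j :: q.1, q.2))
      ([], List.replicate sperm.length none)).2

def ascents_alt (sperm : List Int) (s : Option (List Int)) : List (Int × Int) :=
  let zeros := getZeros s
  let nge := buildNge sperm
  (List.range (sperm.length - 1)).foldl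
    (fun acc i =>
      if PySem.Set.contains zeros (sperm.getD i 0) then
        match nge.getD i none with
        | some j => acc ++ [((i : Int), j)]
        | none => acc
      else if sperm.getD i 0 < sperm.getD (i + 1) 0 then
        acc ++ [((i : Int), (i : Int) + 1)]
      else acc)
    []

-- ===== PRECONDITION & SPEC =====
def Spec_ascents (sperm : List Int) (s : Option (List Int)) (out : List (Int × Int)) : Prop := out = ascents_alt sperm s
instance (sperm : List Int) (s : Option (List Int)) (out : List (Int × Int)) : Decidable (Spec_ascents sperm s out) := by unfold Spec_ascents; infer_instance

-- ===== CLAIM (what is proved, stated in full; the proofs are below) =====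
def Claim_equal_ascents : Prop := ∀ (sperm : List Int) (s : Option (List Int)), Dom_ascents sperm s → Spec_ascents sperm s (ascents sperm s)

-- ===== LEMMAS AND PROOFS =====

theorem getD_set_self (l : List (Option Int)) (i : Nat) (h : i < l.length) (a d : Option Int) :
    (l.set i a).getD i d = a := by
  simp [List.getD, h]

theorem getD_set_ne (l : List (Option Int)) (i k : Nat) (h : i ≠ k) (a d : Option Int) :
    (l.set i a).getD k d = l.getD k d := by
  simp [List.getD, List.getElem?_set_ne, h]

theorem getD_replicate_none (n k : Nat) :
    (List.replicate n (none : Option Int)).getD k none = none := by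
  simp [List.getD, List.getElem?_replicate]
  split <;> rfl

-- if no element of [j, n) is greater than vi, A's scan finds nothing
theorem firstAsc_none (sperm : List Int) (vi : Int) (n : Nat) :
    ∀ j, (∀ t, j ≤ t → t < n → ¬ vi < sperm.getD t 0) → firstAsc sperm vi n j = none := by
  have key : ∀ fuel j, n - j ≤ fuel → (∀ t, j ≤ t → t < n → ¬ vi < sperm.getD t 0) →
      firstAsc sperm vi n j = none := by
    intro fuel
    induction fuel with
    | zero =>
      intro j hle _
      rw [firstAsc]
      have : ¬ j < n := by omega
      simp [this]
    | succ f ih =>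
      intro j hle h
      rw [firstAsc]
      split
      · next hj =>
        rw [if_neg (h j le_rfl hj)]
        exact ih (j + 1) (by omega) (fun t ht1 ht2 => h t (by omega) ht2)
      · rfl
  exact fun j h => key (n - j) j le_rfl h

-- a found result of A's scan is stable when the right bound grows by one
theorem firstAsc_stable (sperm : List Int) (vi : Int) (m : Nat) :
    ∀ j r, firstAsc sperm vi m j = some r → firstAsc sperm vi (m + 1) j = some r := by
  have key : ∀ fuel j r, m - j ≤ fuel → firstAsc sperm vi m j = some r →
      firstAsc sperm vi (m + 1) j = some r := by
    intro fuel
    induction fuel with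
    | zero =>
      intro j r hle h
      rw [firstAsc] at h
      have : ¬ j < m := by omega
      simp [this] at h
    | succ f ih =>
      intro j r hle h
      rw [firstAsc] at h
      by_cases hj : j < m
      · rw [dif_pos hj] at h
        rw [firstAsc, dif_pos (by omega : j < m + 1)]
        by_cases hv : vi < sperm.getD j 0
        · rwa [if_pos hv] at h ⊢
        · rw [if_neg hv] at h ⊢
          exact ih (j + 1) r (by omega) h
      · simp [hj] at h
  exact fun j r h => key (m - j) j r le_rfl h

-- if j is the first index ≥ a with vi < sperm[j], A's scan returns j
theorem firstAsc_found (sperm : List Int) (vi : Int) (n j : Nat) (hjn : j < n)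
    (hgt : vi < sperm.getD j 0) :
    ∀ a, a ≤ j → (∀ t, a ≤ t → t < j → ¬ vi < sperm.getD t 0) →
      firstAsc sperm vi n a = some j := by
  have key : ∀ fuel a, j - a ≤ fuel → a ≤ j → (∀ t, a ≤ t → t < j → ¬ vi < sperm.getD t 0) →
      firstAsc sperm vi n a = some j := by
    intro fuel
    induction fuel with
    | zero =>
      intro a hle ha _
      have : a = j := by omega
      subst this
      rw [firstAsc, dif_pos hjn, if_pos hgt]
    | succ f ih =>
      intro a hle ha hpre
      by_cases haj : a = j
      · subst haj
        rw [firstAsc, dif_pos hjn, if_pos hgt]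
      · have halt : a < j := by omega
        rw [firstAsc, dif_pos (by omega : a < n), if_neg (hpre a le_rfl halt)]
        exact ih (a + 1) (by omega) (by omega) (fun t ht1 ht2 => hpre t (by omega) ht2)
  exact fun a ha hpre => key (j - a) a le_rfl ha hpre

-- the invariant carried through B's first pass, after processing indices < m
def NgeInv (sperm : List Int) (m : Nat) (st : List Nat) (nge : List (Option Int)) : Prop :=
  nge.length = sperm.length ∧
  (∀ k ∈ st, k < m) ∧
  st.Pairwise (· > ·) ∧
  (∀ k ∈ st, ∀ t, k < t → t < m → sperm.getD t 0 ≤ sperm.getD k 0) ∧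
  (∀ k ∈ st, nge.getD k none = none) ∧
  (∀ k, k < m → k ∉ st →
    nge.getD k none = (firstAsc sperm (sperm.getD k 0) m (k + 1)).map (fun x => (x : Int)) ∧
    (firstAsc sperm (sperm.getD k 0) m (k + 1)).isSome) ∧
  (∀ k, m ≤ k → nge.getD k none = none)

theorem popLoop_spec (sperm : List Int) (j : Nat) (hj : j < sperm.length) :
    ∀ st nge,
      nge.length = sperm.length →
      (∀ k ∈ st, k < j) →
      st.Pairwise (· > ·) →
      (∀ k ∈ st, ∀ t, k < t → t < j → sperm.getD t 0 ≤ sperm.getD k 0) →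
      (∀ k ∈ st, nge.getD k none = none) →
      (∀ k, k < j → k ∉ st →
        nge.getD k none = (firstAsc sperm (sperm.getD k 0) (j + 1) (k + 1)).map (fun x => (x : Int)) ∧
        (firstAsc sperm (sperm.getD k 0) (j + 1) (k + 1)).isSome) →
      (∀ k, j ≤ k → nge.getD k none = none) →
      NgeInv sperm (j + 1) (j :: (popLoop sperm j st nge).1) (popLoop sperm j st nge).2 := by
  intro st
  induction st with
  | nil =>
    intro nge h1 _ _ _ _ h6 h7
    refine ⟨h1, ?_, ?_, ?_, ?_, ?_, ?_⟩
    · intro k hk; simp [popLoop] at hk; omega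
    · simp [popLoop]
    · intro k hk t ht1 ht2; simp [popLoop] at hk; omega
    · intro k hk; simp [popLoop] at hk; subst hk; simpa [popLoop] using h7 _ le_rfl
    · intro k hk hkn
      simp [popLoop] at hkn
      exact h6 k (by omega) (by simp)
    · intro k hk; simpa [popLoop] using h7 k (by omega)
  | cons k st ih =>
    intro nge h1 h2 h3 h4 h5 h6 h7
    have hk : k < j := h2 k (by simp)
    have hkl : k < nge.length := by omega
    by_cases hcmp : sperm.getD k 0 < sperm.getD j 0
    · have hres : popLoop sperm j (k :: st) nge = popLoop sperm j st (nge.set k (some (j : Int))) := by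
        rw [popLoop]; rw [if_pos hcmp]
      rw [hres]
      apply ih
      · simpa using h1
      · exact fun k' hk' => h2 k' (by simp [hk'])
      · exact (List.pairwise_cons.mp h3).2
      · exact fun k' hk' => h4 k' (by simp [hk'])
      · intro k' hk'
        have hne : k ≠ k' := by
          have := (List.pairwise_cons.mp h3).1 k' hk'
          omega
        rw [getD_set_ne _ _ _ hne]
        exact h5 k' (by simp [hk'])
      · intro k' hk' hkn'
        by_cases hkk : k' = k
        · subst hkk
          rw [getD_set_self _ _ hkl]
          have hfa : firstAsc sperm (sperm.getD k' 0) (j + 1) (k' + 1) = some j := by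
            apply firstAsc_found sperm _ (j + 1) j (by omega) hcmp (k' + 1) (by omega)
            intro t ht1 ht2
            have := h4 k' (by simp) t (by omega) ht2
            omega
          rw [hfa]
          simp
        · rw [getD_set_ne _ _ _ (fun h => hkk (h.symm))]
          exact h6 k' hk' (by simp [hkk, hkn'])
      · intro k' hk'
        rw [getD_set_ne _ _ _ (by omega)]
        exact h7 k' hk'
    · have hres : popLoop sperm j (k :: st) nge = (k :: st, nge) := by
        rw [popLoop]; rw [if_neg hcmp]
      rw [hres]
      have hjk : sperm.getD j 0 ≤ sperm.getD k 0 := by omega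
      have hpair := List.pairwise_cons.mp h3
      refine ⟨h1, ?_, ?_, ?_, ?_, ?_, ?_⟩
      · intro k' hk'
        simp at hk'
        rcases hk' with h | h | h
        · omega
        · omega
        · have := h2 k' (by simp [h]); omega
      · refine List.pairwise_cons.mpr ⟨?_, h3⟩
        intro k' hk'
        simp at hk'
        rcases hk' with h | h
        · omega
        · have := h2 k' (by simp [h]); omega
      · intro k' hk' t ht1 ht2
        simp at hk'
        rcases hk' with h | h | h
        · omega
        · subst h
          by_cases htj : t = j
          · subst htj; exact hjk
          · exact h4 k' (by simp) t ht1 (by omega)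
        · by_cases htj : t = j
          · subst htj
            have hk'k : k' < k := by have := hpair.1 k' h; omega
            have h1' : sperm.getD k 0 ≤ sperm.getD k' 0 :=
              h4 k' (by simp [h]) k hk'k hk
            omega
          · exact h4 k' (by simp [h]) t ht1 (by omega)
      · intro k' hk'
        simp at hk'
        rcases hk' with h | h | h
        · subst h; exact h7 k' le_rfl
        · subst h; exact h5 k' (by simp)
        · exact h5 k' (by simp [h])
      · intro k' hk' hkn'
        simp at hkn'
        exact h6 k' (by omega) (by simp [hkn'.2.1, hkn'.2.2])
      · intro k' hk'
        exact h7 k' (by omega)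

theorem buildNge_inv (sperm : List Int) :
    ∀ m, m ≤ sperm.length →
      NgeInv sperm m
        ((List.range m).foldl
          (fun p j => let q := popLoop sperm j p.1 p.2; (j :: q.1, q.2))
          ([], List.replicate sperm.length none)).1
        ((List.range m).foldl
          (fun p j => let q := popLoop sperm j p.1 p.2; (j :: q.1, q.2))
          ([], List.replicate sperm.length none)).2 := by
  intro m
  induction m with
  | zero =>
    intro _
    refine ⟨by simp, by simp, by simp, by simp, by simp, ?_, ?_⟩
    · intro k hk; omega
    · intro k _; exact getD_replicate_none _ _
  | succ m ih =>
    intro hm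
    have hinv := ih (by omega)
    obtain ⟨i1, i2, i3, i4, i5, i6, i7⟩ := hinv
    rw [List.range_succ, List.foldl_append, List.foldl_cons, List.foldl_nil]
    have hspec := popLoop_spec sperm m (by omega)
      ((List.range m).foldl
        (fun p j => let q := popLoop sperm j p.1 p.2; (j :: q.1, q.2))
        ([], List.replicate sperm.length none)).1
      ((List.range m).foldl
        (fun p j => let q := popLoop sperm j p.1 p.2; (j :: q.1, q.2))
        ([], List.replicate sperm.length none)).2
      i1 i2 i3 i4 i5
      (by
        intro k hk hkn
        obtain ⟨he, hs⟩ := i6 k hk hkn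
        obtain ⟨r, hr⟩ := Option.isSome_iff_exists.mp hs
        have hr' := firstAsc_stable sperm (sperm.getD k 0) m (k + 1) r hr
        rw [he, hr, hr']
        simp)
      i7
    exact hspec

theorem buildNge_spec' (sperm : List Int) (i : Nat) (hi : i < sperm.length) :
    (((List.range sperm.length).foldl
        (fun p j => let q := popLoop sperm j p.1 p.2; (j :: q.1, q.2))
        ([], List.replicate sperm.length none)).2).getD i none =
      (firstAsc sperm (sperm.getD i 0) sperm.length (i + 1)).map (fun x => (x : Int)) := by
  obtain ⟨i1, i2, i3, i4, i5, i6, i7⟩ := buildNge_inv sperm sperm.length le_rfl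
  by_cases hmem : i ∈ ((List.range sperm.length).foldl
      (fun p j => let q := popLoop sperm j p.1 p.2; (j :: q.1, q.2))
      ([], List.replicate sperm.length none)).1
  · rw [i5 i hmem]
    rw [firstAsc_none sperm _ _ (i + 1) ?_]
    · rfl
    · intro t ht1 ht2
      have := i4 i hmem t (by omega) ht2
      omega
  · exact (i6 i hi hmem).1

theorem buildNge_spec (sperm : List Int) (i : Nat) (hi : i < sperm.length) :
    (buildNge sperm).getD i none =
      (firstAsc sperm (sperm.getD i 0) sperm.length (i + 1)).map (fun x => (x : Int)) := by
  unfold buildNge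
  exact buildNge_spec' sperm i hi

-- ===== VERDICT (by name: the statement is the Claim_ definition above) =====
theorem ascents_spec : Claim_equal_ascents := by
  intro sperm s _
  unfold Spec_ascents ascents ascents_alt
  apply Eq.symm
  apply PySem.List.foldl_congr_mem
  intro acc i hi
  have hilt : i < sperm.length := by
    have := List.mem_range.mp hi; omega
  rw [buildNge_spec sperm i hilt]
  cases firstAsc sperm (sperm.getD i 0) sperm.length (i + 1) <;> simp
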